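-- pv_equiv track=rewrite | github.com/Nuyoah28/Monitoring-system | algorithm/Yolov8/mamba_yolo_prompts.py | flatten_prompt_groups
-- ===== SOURCE A (Python) =====
-- def flatten_prompt_groups(prompt_groups):
--     """Flatten grouped prompts to the category list passed into YOLO-World."""
--     categories = []
--     group_label_ids = []
--     for group in prompt_groups:
--         label_ids = []
--         for prompt in group:
--             label_ids.append(len(categories))
--             categories.append(prompt)
--         group_label_ids.append(label_ids)
--     return categories, group_label_ids
-- ===== SOURCE B (Python) =====
-- def flatten_prompt_groups(prompt_groups):
--     """Flatten grouped prompts to the category list passed into YOLO-World."""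
--     groups = [list(g) for g in prompt_groups]
--     categories = [p for g in groups for p in g]
--     all_ids = list(range(len(categories)))
--     group_label_ids = []
--     for g in groups:
--         group_label_ids.append(all_ids[:len(g)])
--         all_ids = all_ids[len(g):]
--     return categories, group_label_ids
-- ===== Notes on version B (the rewrite author's own statement) =====
-- stated objective: alternative
-- what changed: B works in stages: it flattens all groups first, enumerates the whole flattened list once as a global id list range(len(categories)), and then partitions that id list into per-group blocks by repeated slicing, instead of A's single interleaved pass that reads len(categories) before each append.
import Mathlib
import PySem

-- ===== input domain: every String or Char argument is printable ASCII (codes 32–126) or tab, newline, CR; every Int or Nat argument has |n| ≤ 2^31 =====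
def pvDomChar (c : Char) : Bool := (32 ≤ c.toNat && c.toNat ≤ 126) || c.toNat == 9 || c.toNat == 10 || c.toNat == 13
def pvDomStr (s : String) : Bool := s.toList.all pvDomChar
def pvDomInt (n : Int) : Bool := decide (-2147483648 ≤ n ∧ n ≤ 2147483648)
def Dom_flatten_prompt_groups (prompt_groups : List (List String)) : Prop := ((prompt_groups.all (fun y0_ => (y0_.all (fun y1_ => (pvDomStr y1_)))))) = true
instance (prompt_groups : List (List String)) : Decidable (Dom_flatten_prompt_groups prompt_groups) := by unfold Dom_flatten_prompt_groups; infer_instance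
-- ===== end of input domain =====

-- B is an alternative staged decomposition: flatten everything, enumerate the flat list
-- once as a global id list, then partition that id list into per-group blocks by slicing
-- (not faster: re-slicing copies the remaining id list per group).

-- ===== PORT A =====
-- outer state: (categories, group_label_ids); inner state: (label_ids, categories)
def flatten_prompt_groups (prompt_groups : List (List String)) : List String × List (List Int) :=
  prompt_groups.foldl (fun st group =>
    let inner := group.foldl (fun (s : List Int × List String) prompt =>
      (s.1 ++ [(s.2.length : Int)], s.2 ++ [prompt])) ([], st.1)
    (inner.2, st.2 ++ [inner.1])) ([], [])

-- ===== PORT B =====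
-- stages: flatten (nested comprehension), global id list, then the slicing loop with
-- state (group_label_ids, all_ids)
def flatten_prompt_groups_alt (prompt_groups : List (List String)) : List String × List (List Int) :=
  let groups := prompt_groups
  let categories := groups.flatMap (fun g => g)
  let all_ids := PySem.List.pyRange 0 (categories.length : Int) 1
  let st := groups.foldl (fun (s : List (List Int) × List Int) g =>
      (s.1 ++ [PySem.List.slice s.2 none (some (g.length : Int))],
       PySem.List.slice s.2 (some (g.length : Int)) none)) ([], all_ids)
  (categories, st.1)

-- ===== PRECONDITION & SPEC =====
def Spec_flatten_prompt_groups (prompt_groups : List (List String)) (out : List String × List (List Int)) : Prop := out = flatten_prompt_groups_alt prompt_groups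
instance (prompt_groups : List (List String)) (out : List String × List (List Int)) : Decidable (Spec_flatten_prompt_groups prompt_groups out) := by unfold Spec_flatten_prompt_groups; infer_instance

-- ===== CLAIM (what is proved, stated in full; the proofs are below) =====
def Claim_equal_flatten_prompt_groups : Prop := ∀ (prompt_groups : List (List String)), Dom_flatten_prompt_groups prompt_groups → Spec_flatten_prompt_groups prompt_groups (flatten_prompt_groups prompt_groups)

-- ===== LEMMAS AND PROOFS =====

-- the common intermediate: the block of index labels of each group, offsets accumulated
def pvBlocks (off : Nat) : List (List String) → List (List Int)
  | [] => []
  | g :: gs => (List.range' off g.length).map (fun n => (n : Int)) :: pvBlocks (off + g.length) gs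

-- casting each element to Int, one at a time, is the mapped cast
theorem pv_map_flatMap (l : List Nat) : List.flatMap (fun (a : Nat) => [(a : Int)]) l = l.map (fun n : Nat => (n : Int)) := by
  induction l with
  | nil => rfl
  | cons a l ih => rw [List.flatMap_cons, ih, List.map_cons, List.singleton_append]

-- A's inner loop appends one index per prompt starting at the current category count.
theorem pv_inner (g : List String) : ∀ (acc : List Int) (cats : List String),
    g.foldl (fun (s : List Int × List String) prompt =>
      (s.1 ++ [(s.2.length : Int)], s.2 ++ [prompt])) (acc, cats)
    = (acc ++ (List.range' cats.length g.length).map (fun n : Nat => (n : Int)), cats ++ g) := by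
  induction g with
  | nil => intro acc cats; simp
  | cons p g ih =>
    intro acc cats
    rw [List.foldl_cons, ih]
    simp [List.range'_succ]

-- A's outer fold appends the flattened groups and the index blocks
theorem pv_A (gs : List (List String)) : ∀ (cats : List String) (gids : List (List Int)),
    gs.foldl (fun st group =>
      let inner := group.foldl (fun (s : List Int × List String) prompt =>
        (s.1 ++ [(s.2.length : Int)], s.2 ++ [prompt])) ([], st.1)
      (inner.2, st.2 ++ [inner.1])) (cats, gids)
    = (cats ++ gs.flatMap (fun g => g), gids ++ pvBlocks cats.length gs) := by
  induction gs with
  | nil => intro cats gids; simp [pvBlocks]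
  | cons g gs ih =>
    intro cats gids
    rw [List.foldl_cons]
    have h : (let inner := g.foldl (fun (s : List Int × List String) prompt =>
          (s.1 ++ [(s.2.length : Int)], s.2 ++ [prompt])) ([], (cats, gids).1)
        ((inner.2, (cats, gids).2 ++ [inner.1]) : List String × List (List Int)))
        = (cats ++ g, gids ++ [(List.range' cats.length g.length).map (fun n : Nat => (n : Int))]) := by
      simp [pv_inner]
    rw [h, ih]
    simp [pvBlocks]
    exact (pv_map_flatMap _).symm

-- B's slicing loop, given the id list = the casted range starting at off, emits the blocks
theorem pv_B (gs : List (List String)) : ∀ (gids : List (List Int)) (off rest : Nat),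
    (gs.foldl (fun (s : List (List Int) × List Int) g =>
      (s.1 ++ [PySem.List.slice s.2 none (some (g.length : Int))],
       PySem.List.slice s.2 (some (g.length : Int)) none))
      (gids, (List.range' off ((gs.map List.length).sum + rest)).map (fun n : Nat => (n : Int)))).1
    = gids ++ pvBlocks off gs := by
  induction gs with
  | nil => intro gids off rest; simp [pvBlocks]
  | cons g gs ih =>
    intro gids off rest
    have hsplit : (List.range' off (((g :: gs).map List.length).sum + rest)).map (fun n : Nat => (n : Int))
        = (List.range' off g.length).map (fun n : Nat => (n : Int))
          ++ (List.range' (off + g.length) ((gs.map List.length).sum + rest)).map (fun n : Nat => (n : Int)) := by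
      rw [← List.map_append]
      congr 1
      have h := @List.range'_append off g.length ((gs.map List.length).sum + rest) 1
      simp only [one_mul] at h
      rw [show (List.map List.length (g :: gs)).sum + rest
            = g.length + ((gs.map List.length).sum + rest) from by simp; omega, ← h]
    rw [hsplit, List.foldl_cons]
    have hlen : ((List.range' off g.length).map (fun n : Nat => (n : Int))).length = g.length := by simp
    rw [PySem.List.slice_to_natCast, PySem.List.slice_from_natCast,
      List.take_left' hlen, List.drop_left' hlen, ih]
    simp [pvBlocks]
    exact (pv_map_flatMap _).symm

-- ===== VERDICT (by name: the statement is the Claim_ definition above) =====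
theorem flatten_prompt_groups_spec : Claim_equal_flatten_prompt_groups := by
  intro gs _
  unfold Spec_flatten_prompt_groups flatten_prompt_groups flatten_prompt_groups_alt
  rw [pv_A]
  simp only [List.nil_append]
  have hid : PySem.List.pyRange 0 ((gs.flatMap (fun g => g)).length : Int) 1
      = (List.range' 0 ((gs.map List.length).sum + 0)).map (fun n : Nat => (n : Int)) := by
    rw [PySem.List.pyRange_one]
    have hl : ((((gs.flatMap (fun g => g)).length : Int)) - 0).toNat = (gs.map List.length).sum + 0 := by
      rw [Int.sub_zero, Int.toNat_natCast, List.length_flatMap]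
      simp
    rw [hl, List.range_eq_range']
    simp
  refine Prod.ext (by simp) ?_
  show pvBlocks 0 gs = _
  conv_rhs => rw [hid, pv_B]
  simp
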